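-- pv_equiv track=rewrite | github.com/andrewlopez1/compilers | Assignment1.py | step_State1
-- ===== SOURCE A (Python) =====
-- letters = 'ABCDEFGHIJKLMNOPQRSTUVWXYZabcdefghijklmnopqrstuvwxyz'
--
-- digits = '1234567890'
--
-- separators = '[]();:{},'
--
-- operators = '=-+*/<>%'
--
-- def getType(char):
--     if char in letters:
--         return 'L'
--     elif char in digits:
--         return 'D'
--     elif char in separators:
--         return 'S'
--     elif char in operators:
--         return 'O'
--     else:
--         return char
--
-- def step_State1(lexeme):
--     input = lexeme[0]
--
--     if getType(input) in 'LD_':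
--         if len(lexeme) == 1:
--             return 'Identifier'
--         return step_State1(lexeme[1:])
--     else:
--         return 'Invalid Token'
-- ===== SOURCE B (Python) =====
-- _IDENT_CHARS = frozenset(
--     'ABCDEFGHIJKLMNOPQRSTUVWXYZabcdefghijklmnopqrstuvwxyz1234567890_')
--
-- def step_State1(lexeme):
--     return 'Identifier' if all(ch in _IDENT_CHARS for ch in lexeme) else 'Invalid Token'
-- ===== Notes on version B (the rewrite author's own statement) =====
-- stated objective: faster
-- what changed: A recursively re-slices the suffix lexeme[1:] and classifies each head through getType (quadratic slicing); B does one linear all() scan of the characters against a precomputed frozenset of identifier characters.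
-- outside the precondition, e.g. on step_State1(''): A raises IndexError, B returns 'Identifier'
import Mathlib
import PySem

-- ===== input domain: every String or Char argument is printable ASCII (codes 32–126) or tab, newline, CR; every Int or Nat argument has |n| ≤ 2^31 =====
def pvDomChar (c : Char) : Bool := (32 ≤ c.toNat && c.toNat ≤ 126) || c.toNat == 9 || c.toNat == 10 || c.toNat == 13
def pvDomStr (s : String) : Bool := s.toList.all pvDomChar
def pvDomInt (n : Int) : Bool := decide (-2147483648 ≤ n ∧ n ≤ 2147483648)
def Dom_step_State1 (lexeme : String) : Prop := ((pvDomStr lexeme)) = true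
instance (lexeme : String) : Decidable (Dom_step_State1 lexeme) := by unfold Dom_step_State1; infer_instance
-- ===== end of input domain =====

-- B replaces A's recursive suffix-slicing with a single linear all() scan over a precomputed
-- character set (objective: faster).

-- ===== PORT A =====
def pvLetters : List Char := "ABCDEFGHIJKLMNOPQRSTUVWXYZabcdefghijklmnopqrstuvwxyz".toList
def pvDigits : List Char := "1234567890".toList
def pvSeparators : List Char := "[]();:{},".toList
def pvOperators : List Char := "=-+*/<>%".toList

-- Python's `char in letters` on a one-character `char` is exactly list membership of that char.
def getType (c : Char) : String :=
  if c ∈ pvLetters then "L"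
  else if c ∈ pvDigits then "D"
  else if c ∈ pvSeparators then "S"
  else if c ∈ pvOperators then "O"
  else String.ofList [c]

-- `getType(input) in 'LD_'` is substring membership (PySem.Chars.isIn).
def stepA : List Char → String
  | [] => "Invalid Token"          -- unreachable under Pre_ (Python raises IndexError on '')
  | c :: rest =>
      if PySem.Chars.isIn (getType c).toList ['L', 'D', '_'] then
        if rest = [] then "Identifier" else stepA rest
      else "Invalid Token"

def step_State1 (lexeme : String) : String := stepA lexeme.toList

-- ===== PORT B =====
def pvIdentChars : List Char := pvLetters ++ pvDigits ++ ['_']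

def step_State1_alt (lexeme : String) : String :=
  if lexeme.toList.all (fun ch => pvIdentChars.contains ch) then "Identifier"
  else "Invalid Token"

-- ===== PRECONDITION & SPEC =====
-- Python A evaluates lexeme[0], which raises IndexError on the empty string.
def Pre_step_State1 (lexeme : String) : Prop := lexeme ≠ ""
instance (lexeme : String) : Decidable (Pre_step_State1 lexeme) := by unfold Pre_step_State1; infer_instance
def pvWitness_step_State1 : String := "ab_3"

def Spec_step_State1 (lexeme : String) (out : String) : Prop := out = step_State1_alt lexeme
instance (lexeme : String) (out : String) : Decidable (Spec_step_State1 lexeme out) := by unfold Spec_step_State1; infer_instance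

-- ===== CLAIM (what is proved, stated in full; the proofs are below) =====
def Claim_equal_step_State1 : Prop := ∀ (lexeme : String), Dom_step_State1 lexeme → Pre_step_State1 lexeme → Spec_step_State1 lexeme (step_State1 lexeme)

-- ===== LEMMAS AND PROOFS =====

-- A's per-character test agrees with B's set membership.
lemma okA_eq (c : Char) :
    PySem.Chars.isIn (getType c).toList ['L', 'D', '_'] = pvIdentChars.contains c := by
  unfold getType pvIdentChars
  by_cases hl : c ∈ pvLetters
  · simp [hl]; decide
  · by_cases hd : c ∈ pvDigits
    · simp [hl, hd]; decide
    · by_cases hs : c ∈ pvSeparators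
      · have h_ : c ≠ '_' := by rintro rfl; revert hs; decide
        simp [hl, hd, hs, h_]; decide
      · by_cases ho : c ∈ pvOperators
        · have h_ : c ≠ '_' := by rintro rfl; revert ho; decide
          simp [hl, hd, hs, ho, h_]; decide
        · simp [hl, hd, hs, ho]
          by_cases h_ : c = '_'
          · subst h_; decide
          · have hL : c ≠ 'L' := by rintro rfl; revert hl; decide
            have hD : c ≠ 'D' := by rintro rfl; revert hl; decide
            simp only [h_, decide_false]
            rw [PySem.Chars.isIn_eq_false_iff]
            intro h
            have hc : c ∈ ['L', 'D', '_'] := h.sublist.subset (List.mem_singleton_self c)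
            simp only [List.mem_cons, List.not_mem_nil, or_false] at hc
            rcases hc with h | h | h <;> simp_all
  -- note: singleton-infix ↔ membership done by hand above

lemma stepA_eq (l : List Char) (h : l ≠ []) :
    stepA l = (if l.all (fun ch => pvIdentChars.contains ch) then "Identifier" else "Invalid Token") := by
  induction l with
  | nil => exact absurd rfl h
  | cons c rest ih =>
    rw [stepA, okA_eq]
    cases hre : rest with
    | nil => simp [List.all_cons]
    | cons d t =>
      rw [← hre]
      rw [ih (by simp [hre])]
      by_cases hc : c ∈ pvIdentChars <;> simp [hc, hre, List.all_cons]

-- ===== VERDICT (by name: the statement is the Claim_ definition above) =====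
theorem step_State1_spec : Claim_equal_step_State1 := by
  intro lexeme _ hpre
  unfold Spec_step_State1 step_State1 step_State1_alt
  have hne : lexeme.toList ≠ [] := by
    intro h
    exact hpre (by simpa [String.toList_eq_nil_iff] using h)
  exact stepA_eq _ hne
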